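-- pv_equiv track=rewrite | github.com/AntonyVasilev/python | my_scripts.py | round_list
-- ===== SOURCE A (Python) =====
-- from itertools import count, cycle
--
-- def round_list(you_list, max_count):
--     """
--     Итератор, повторяющий элементы некоторого списка, определенного заранее
--     :param you_list: ['bus', 'plane', 'car']
--     :param max_count: 3
--     :return: 'bus', 'plane', 'car', 'bus', 'plane', 'car', 'bus', 'plane', 'car'
--     """
--     result = []
--     i = 1
--     for el in cycle(you_list):
--         if i > max_count:
--             break
--         else:
--             result.append(el)
--             i += 1
--     return result
-- ===== SOURCE B (Python) =====
-- def round_list(you_list, max_count):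
--     if not you_list:
--         return []
--     return [you_list[i % len(you_list)] for i in range(max_count)]
-- ===== Notes on version B (the rewrite author's own statement) =====
-- stated objective: idiomatic
-- what changed: Replaces the cycle-iterator loop with a break counter by a single list comprehension indexing you_list[i % len(you_list)] over range(max_count), with an empty-list guard matching cycle([]) yielding nothing.
import Mathlib
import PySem

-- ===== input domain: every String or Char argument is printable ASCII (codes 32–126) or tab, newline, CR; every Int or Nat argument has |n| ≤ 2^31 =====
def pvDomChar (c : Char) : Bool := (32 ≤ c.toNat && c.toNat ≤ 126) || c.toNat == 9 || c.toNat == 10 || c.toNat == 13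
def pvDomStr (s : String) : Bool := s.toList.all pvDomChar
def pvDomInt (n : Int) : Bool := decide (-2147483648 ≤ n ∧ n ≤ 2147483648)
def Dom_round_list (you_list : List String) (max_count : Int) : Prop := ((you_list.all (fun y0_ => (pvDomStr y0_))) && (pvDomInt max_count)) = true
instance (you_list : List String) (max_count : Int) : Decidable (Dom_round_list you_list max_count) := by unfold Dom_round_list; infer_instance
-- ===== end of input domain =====

-- B replaces A's cycle-iterator loop with counter/break by index arithmetic
-- you_list[i % len] over range(max_count) (idiomatic; same cost).


-- ===== PORT A =====
-- the for-loop over cycle(you_list): `rest` is the not-yet-consumed part of the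
-- current pass over you_list (refilled when exhausted); the loop body appends the
-- element and counts; fuel = number of remaining iterations until i > max_count.
def roundListGo (ys : List String) : List String → List String → Nat → List String
  | _, acc, 0 => acc
  | rest, acc, Nat.succ n =>
    match rest with
    | [] => acc   -- unreachable: ys ≠ [] is guaranteed by the caller
    | e :: rs => roundListGo ys (if rs = [] then ys else rs) (acc ++ [e]) n

def round_list (you_list : List String) (max_count : Int) : List String :=
  if you_list = [] then []   -- cycle([]) yields nothing: the for-loop body never runs
  else roundListGo you_list you_list [] max_count.toNat

-- ===== PORT B =====
-- pyGetD's default "" is never used: 0 ≤ i % len < len on every i of the range.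
def round_list_alt (you_list : List String) (max_count : Int) : List String :=
  if you_list = [] then []
  else (PySem.List.pyRange 0 max_count 1).map
    (fun i => PySem.List.pyGetD you_list (PySem.Int.mod i (you_list.length : Int)) "")

-- ===== PRECONDITION & SPEC =====
def Spec_round_list (you_list : List String) (max_count : Int) (out : List String) : Prop := out = round_list_alt you_list max_count
instance (you_list : List String) (max_count : Int) (out : List String) : Decidable (Spec_round_list you_list max_count out) := by unfold Spec_round_list; infer_instance

-- ===== CLAIM (what is proved, stated in full; the proofs are below) =====
def Claim_equal_round_list : Prop := ∀ (you_list : List String) (max_count : Int), Dom_round_list you_list max_count → Spec_round_list you_list max_count (round_list you_list max_count)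

-- ===== LEMMAS AND PROOFS =====

-- the loop invariant: starting a step with rest = ys.drop k (k < |ys|), the j-th
-- element still to be appended is ys[(k+j) % |ys|].
theorem roundListGo_eq (ys : List String) :
    ∀ (n k : Nat) (acc : List String), k < ys.length →
      roundListGo ys (ys.drop k) acc n
        = acc ++ (List.range n).map (fun j => ys.getD ((k + j) % ys.length) "") := by
  intro n
  induction n with
  | zero => intro k acc hk; simp [roundListGo]
  | succ n ih =>
    intro k acc hk
    obtain ⟨e, rs, hrest⟩ : ∃ e rs, ys.drop k = e :: rs := by
      cases h : ys.drop k with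
      | nil => exact absurd (List.drop_eq_nil_iff.mp h) (by omega)
      | cons a b => exact ⟨a, b, rfl⟩
    have he : e = ys.getD k "" := by
      have h0 : (ys.drop k).getD 0 "" = ys.getD k "" := by
        simp [List.getD, List.getElem?_drop]
      simpa [hrest] using h0
    have hrs : rs = ys.drop (k + 1) := by
      have := congrArg (List.drop 1) hrest
      simpa [List.drop_drop] using this.symm
    have hsplit : (List.range (n + 1)).map (fun j => ys.getD ((k + j) % ys.length) "")
        = ys.getD k "" :: (List.range n).map (fun j => ys.getD ((k + 1 + j) % ys.length) "") := by
      rw [List.range_succ_eq_map, List.map_cons, List.map_map]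
      congr 1
      · simp [Nat.mod_eq_of_lt hk]
      · apply List.map_congr_left
        intro j hj
        simp only [Function.comp_apply, Nat.succ_eq_add_one]
        rw [show k + (j + 1) = k + 1 + j from by omega]
    rw [hrest]
    simp only [roundListGo]
    by_cases hend : rs = []
    · have hk1 : k + 1 = ys.length := by
        have hlen := List.length_drop (i := k + 1) (l := ys)
        rw [← hrs, hend] at hlen
        simp at hlen; omega
      rw [if_pos hend]
      have h2 := ih 0 (acc ++ [e]) (by omega)
      simp only [List.drop_zero] at h2
      rw [h2, hsplit]
      have hmap : (List.range n).map (fun j => ys.getD ((k + 1 + j) % ys.length) "")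
          = (List.range n).map (fun j => ys.getD ((0 + j) % ys.length) "") := by
        apply List.map_congr_left
        intro j hj
        rw [show k + 1 + j = ys.length + j from by omega, Nat.add_mod_left, Nat.zero_add]
      rw [hmap, he]
      simp [List.append_assoc]
    · rw [if_neg hend, hrs]
      have hk1 : k + 1 < ys.length := by
        have hlen := List.length_drop (i := k + 1) (l := ys)
        rw [← hrs] at hlen
        have hpos : 0 < rs.length := List.length_pos_of_ne_nil hend
        omega
      rw [ih (k + 1) (acc ++ [e]) hk1, hsplit, he]
      simp [List.append_assoc]

-- ===== VERDICT (by name: the statement is the Claim_ definition above) =====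
theorem round_list_spec : Claim_equal_round_list := by
  intro ys mc _
  unfold Spec_round_list round_list round_list_alt
  by_cases hys : ys = []
  · simp [hys]
  · rw [if_neg hys, if_neg hys]
    have h0 : ys.drop 0 = ys := rfl
    have hlen : 0 < ys.length := List.length_pos_of_ne_nil hys
    have := roundListGo_eq ys mc.toNat 0 [] hlen
    rw [h0] at this
    rw [this]
    rw [PySem.List.pyRange_one]
    simp only [List.map_map, List.nil_append, Int.sub_zero]
    apply List.map_congr_left
    intro j hj
    simp only [Function.comp, Nat.zero_add, Int.zero_add]
    rw [PySem.Int.mod_natCast, PySem.List.pyGetD_natCast]
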